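-- pv_equiv track=rewrite | github.com/Developers13/nwpuoj-challenges-python | T037_铺地板.py | flooring
-- ===== SOURCE A (Python) =====
-- def flooring(n):
--     f = [0]
--     for i in range(1,n+1):
--         if i % 2 != 0:
--             f.append(0)
--         else:
--             if i == 2:
--                 f.append(3)
--             elif i == 4:
--                 f.append(11)
--             else:
--                 #n = 2m
--                 #f(n) = 3f(n-1) + 2(f(n-2) + f(n-3) + ... + f(2) + f(1))
--                 f.append(4*f[i-2]-f[i-4])
--     return f
-- ===== SOURCE B (Python) =====
-- def flooring(n):
--     # Prefix-sum recurrence: for even i, f(i) = 3*prev + 2*S where prev is the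
--     # previous even-index value (phantom 1 before any) and S accumulates all
--     # earlier even-index values plus the phantom. No back-indexing, no special cases.
--     f = [0]
--     prev = 1
--     S = 0
--     for i in range(1, n + 1):
--         if i % 2 != 0:
--             f.append(0)
--         else:
--             term = 3 * prev + 2 * S
--             f.append(term)
--             S += prev
--             prev = term
--     return f
-- ===== Notes on version B (the rewrite author's own statement) =====
-- stated objective: alternative
-- what changed: Replaces the windowed two-term recurrence 4*f[i-2]-f[i-4] with its hard-coded base-case branches by a prefix-sum recurrence maintaining two scalars (previous even term and a running accumulated sum), computing each even term as 3*prev+2*S with no list back-indexing and no special cases.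
import Mathlib
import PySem

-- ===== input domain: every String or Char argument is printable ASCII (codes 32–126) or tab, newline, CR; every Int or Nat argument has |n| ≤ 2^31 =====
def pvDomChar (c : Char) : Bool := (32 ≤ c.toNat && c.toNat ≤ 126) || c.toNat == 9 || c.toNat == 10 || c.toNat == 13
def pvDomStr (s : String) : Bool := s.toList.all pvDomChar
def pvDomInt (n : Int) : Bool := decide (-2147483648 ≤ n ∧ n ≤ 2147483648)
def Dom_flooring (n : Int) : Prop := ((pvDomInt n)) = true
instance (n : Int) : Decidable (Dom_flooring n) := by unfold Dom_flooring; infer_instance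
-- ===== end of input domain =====

-- B replaces A's windowed recurrence 4*f[i-2]-f[i-4] (with hard-coded base-case branches) by a
-- prefix-sum recurrence over two scalars; alternative decomposition, same O(n) cost.

-- ===== PORT A =====
-- one loop iteration of A; the list indexing f[i-2], f[i-4] is always in range
-- when that branch runs (i even, i ≥ 6, len f = i), so .getD 0 is never taken
def flooringA_step (f : List Int) (i : Int) : List Int :=
  if i % 2 ≠ 0 then f ++ [0]
  else if i = 2 then f ++ [3]
  else if i = 4 then f ++ [11]
  else f ++ [4 * ((PySem.List.pyGet? f (i - 2)).getD 0) - ((PySem.List.pyGet? f (i - 4)).getD 0)]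

def flooring (n : Int) : List Int :=
  (PySem.List.pyRange 1 (n + 1) 1).foldl flooringA_step [0]

-- ===== PORT B =====
-- one loop iteration of B over state (f, prev, S)
def flooringB_step (st : List Int × Int × Int) (i : Int) : List Int × Int × Int :=
  if i % 2 ≠ 0 then (st.1 ++ [0], st.2.1, st.2.2)
  else
    let term := 3 * st.2.1 + 2 * st.2.2
    (st.1 ++ [term], term, st.2.2 + st.2.1)

def flooring_alt (n : Int) : List Int :=
  ((PySem.List.pyRange 1 (n + 1) 1).foldl flooringB_step ([0], 1, 0)).1

-- ===== PRECONDITION & SPEC =====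
def Spec_flooring (n : Int) (out : List Int) : Prop := out = flooring_alt n
instance (n : Int) (out : List Int) : Decidable (Spec_flooring n out) := by unfold Spec_flooring; infer_instance

-- ===== CLAIM =====
def Claim_equal_flooring : Prop := ∀ (n : Int), Dom_flooring n → Spec_flooring n (flooring n)

-- ===== LEMMAS AND PROOFS =====

-- the scalar pair maintained by B at even steps: P k = k-th even-index term (P 0 = phantom 1),
-- Sg k = phantom + sum of the even terms before P k
mutual
def P : Nat → Int
  | 0 => 1
  | k + 1 => 3 * P k + 2 * Sg k
def Sg : Nat → Int
  | 0 => 0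
  | k + 1 => Sg k + P k
end

-- the m-th element of the result list
def g (m : Nat) : Int := if m % 2 = 1 then 0 else if m = 0 then 0 else P (m / 2)

-- the result list after processing steps 1..m
def L (m : Nat) : List Int := (List.range (m + 1)).map g

lemma P_rec (k : Nat) : P (k + 2) = 4 * P (k + 1) - P k := by
  simp [P, Sg]; ring

lemma L_succ (m : Nat) : L (m + 1) = L m ++ [g (m + 1)] := by
  simp [L, List.range_succ]

lemma L_get (m j : Nat) (h : j ≤ m) : (L m)[j]? = some (g j) := by
  simp [L, Nat.lt_succ_of_le h]

lemma main (m : Nat) :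
    (PySem.List.pyRange 1 ((m : Int) + 1) 1).foldl flooringA_step [0] = L m ∧
    (PySem.List.pyRange 1 ((m : Int) + 1) 1).foldl flooringB_step ([0], 1, 0)
      = (L m, P (m / 2), Sg (m / 2)) := by
  induction m with
  | zero =>
      rw [PySem.List.pyRange_one_eq_nil (by norm_num)]
      simp [L, P, Sg, g]
  | succ m ih =>
      have hsplit : PySem.List.pyRange 1 ((m : Int) + 1 + 1) 1
          = PySem.List.pyRange 1 ((m : Int) + 1) 1 ++ [(m : Int) + 1] :=
        PySem.List.pyRange_one_succ_right (a := 1) (b := (m : Int) + 1) (by omega)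
      push_cast
      rw [hsplit, List.foldl_append, List.foldl_append, ih.1, ih.2]
      simp only [List.foldl_cons, List.foldl_nil]
      rcases Nat.even_or_odd (m + 1) with he | ho
      · -- step index m+1 even
        obtain ⟨k, hk⟩ := he
        have hk1 : 1 ≤ k := by omega
        have hmod : ((m : Int) + 1) % 2 = 0 := by omega
        have hdiv : (m + 1) / 2 = k := by omega
        have hdiv' : m / 2 = k - 1 := by omega
        have hg : g (m + 1) = P k := by
          simp only [g]
          rw [if_neg (by omega), if_neg (by omega), hdiv]
        constructor
        · -- A's step
          rw [L_succ]
          by_cases h2 : m + 1 = 2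
          · have hm : m = 1 := by omega
            subst hm
            simp [flooringA_step, L, g, P, Sg]
          · by_cases h4 : m + 1 = 4
            · have hm : m = 3 := by omega
              subst hm
              simp [flooringA_step, L, g, P, Sg]
            · -- m+1 = 2k, k ≥ 3
              have hk3 : 3 ≤ k := by omega
              have e2 : (m : Int) + 1 - 2 = ((m - 1 : Nat) : Int) := by omega
              have e4 : (m : Int) + 1 - 4 = ((m - 3 : Nat) : Int) := by omega
              have hg2 : g (m - 1) = P (k - 1) := by
                simp only [g]
                rw [if_neg (by omega), if_neg (by omega)]
                congr 1; omega
              have hg4 : g (m - 3) = P (k - 2) := by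
                simp only [g]
                rw [if_neg (by omega), if_neg (by omega)]
                congr 1; omega
              simp only [flooringA_step]
              rw [if_neg (by omega), if_neg (by omega), if_neg (by omega)]
              rw [e2, e4, PySem.List.pyGet?_natCast, PySem.List.pyGet?_natCast,
                L_get m (m - 1) (by omega), L_get m (m - 3) (by omega)]
              rw [hg2, hg4, hg]
              have hr := P_rec (k - 2)
              have ek1 : k - 2 + 1 = k - 1 := by omega
              have ek2 : k - 2 + 2 = k := by omega
              rw [ek1, ek2] at hr
              simp [hr]
        · -- B's step
          rw [L_succ]
          simp only [flooringB_step]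
          rw [if_neg (by omega)]
          have hPk : P k = 3 * P (k - 1) + 2 * Sg (k - 1) := by
            have hkk : k = (k - 1) + 1 := by omega
            rw [hkk]; rfl
          have hSk : Sg k = Sg (k - 1) + P (k - 1) := by
            have hkk : k = (k - 1) + 1 := by omega
            rw [hkk]; rfl
          simp [hdiv, hdiv', hg, hPk, hSk]
      · -- step index m+1 odd
        obtain ⟨k, hk⟩ := ho
        have hmod : ((m : Int) + 1) % 2 ≠ 0 := by omega
        have hdiv : (m + 1) / 2 = m / 2 := by omega
        have hg : g (m + 1) = 0 := by simp only [g]; rw [if_pos (by omega)]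
        constructor
        · rw [L_succ, flooringA_step, if_pos hmod, hg]
        · rw [L_succ, flooringB_step, if_pos hmod, hdiv, hg]

-- ===== VERDICT =====
theorem flooring_spec : Claim_equal_flooring := by
  intro n _
  unfold Spec_flooring flooring flooring_alt
  by_cases h : n ≤ 0
  · rw [PySem.List.pyRange_one_eq_nil (by omega)]
    simp
  · obtain ⟨m, rfl⟩ : ∃ m : Nat, n = (m : Int) := ⟨n.toNat, by omega⟩
    rw [(main m).1, (main m).2]
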